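-- pv_equiv track=rewrite | github.com/gleisonbt/gql_wrapper | resolver_builder.py | name_root_node
-- ===== SOURCE A (Python) =====
-- def path_variables(endpoint):
--     path_variables = []
--     paths  = endpoint['path'].split('/')
--     for path in paths[1:len(paths)]:
--         if path[0] == '{':
--             path_variables.append(path)
--     return path_variables
--
-- def name_root_node(endpoint):
--     paths = endpoint['path'].split('/')
--     parameters = path_variables(endpoint)
--     for path_variable in parameters:
--         paths.remove(path_variable)
--     del paths[0]
--
--     cont = 1
--     for path in paths[1:len(paths)]:
--         paths[cont] = path[0].upper() + path[1:len(path)]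
--         cont = cont + 1
--
--     name_root_name = ''
--     for path in paths:
--         name_root_name = name_root_name + path
--
--     return name_root_name
-- ===== SOURCE B (Python) =====
-- def name_root_node(endpoint):
--     parts = []
--     for s in endpoint['path'].split('/')[1:]:
--         if s[0] != '{':
--             parts.append(s if not parts else s[0].upper() + s[1:])
--     return ''.join(parts)
-- ===== Notes on version B (the rewrite author's own statement) =====
-- stated objective: simpler
-- what changed: B replaces A's four phases (collect brace segments, remove them from the list by value, delete the head, capitalize in place by index, then concatenate in a fourth loop) with one pass over split('/')[1:] that filters brace segments and appends each kept segment (capitalized except the first) to an accumulator joined at the end.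
-- outside the precondition, e.g. on name_root_node({'path': '{x}/a/{x}'}): A returns '{x}', B returns 'a'; on name_root_node({'path': '{x}/{x}'}): A returns '', B returns ''
import Mathlib
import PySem

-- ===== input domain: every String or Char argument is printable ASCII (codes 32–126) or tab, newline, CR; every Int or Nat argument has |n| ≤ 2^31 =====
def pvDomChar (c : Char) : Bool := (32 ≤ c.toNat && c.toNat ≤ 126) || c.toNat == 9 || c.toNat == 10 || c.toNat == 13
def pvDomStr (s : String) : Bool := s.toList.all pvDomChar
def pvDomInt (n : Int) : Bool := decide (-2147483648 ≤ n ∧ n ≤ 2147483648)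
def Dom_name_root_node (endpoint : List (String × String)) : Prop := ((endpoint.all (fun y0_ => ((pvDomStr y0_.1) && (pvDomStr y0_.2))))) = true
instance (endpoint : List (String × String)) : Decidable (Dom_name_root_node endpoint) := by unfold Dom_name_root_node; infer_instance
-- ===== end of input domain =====

-- B does one filtering pass over the split path with a join, replacing A's remove/del/in-place-capitalize/concat phases (simpler; equal on every input Pre_ admits).

-- ===== PORT A =====
-- helper `path_variables` of A: collect the segments after the first that start with '{'
def pvPathVariables (endpoint : List (String × String)) : List String :=
  let paths := (PySem.Str.split? ((endpoint.lookup "path").getD "") "/").getD []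
  (PySem.List.slice paths (some 1) (some (paths.length : Int))).foldl
    (fun acc path => if PySem.Str.pyGet? path 0 == some '{' then acc ++ [path] else acc) []

-- path[0].upper() + path[1:len(path)] (A's in-place capitalization); `none` branch unreachable under Pre_ (Python raises IndexError there)
def pvCapA (path : String) : String :=
  String.ofList ((match PySem.Str.pyGet? path 0 with
                  | some c => PySem.Chars.upper [c]
                  | none => []) ++ PySem.Chars.slice path.toList (some 1) (some (PySem.Str.len path)))

def name_root_node (endpoint : List (String × String)) : String :=
  let paths := (PySem.Str.split? ((endpoint.lookup "path").getD "") "/").getD []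
  let parameters := pvPathVariables endpoint
  let paths := parameters.foldl (fun ps v => (PySem.List.remove? ps v).getD ps) paths
  let paths := paths.drop 1          -- del paths[0] (the list is nonempty whenever the Python reaches this line)
  let paths := match paths with      -- the for-loop rewriting paths[cont] for path in paths[1:], cont = 1, 2, …
               | [] => []
               | f :: rest => f :: rest.map pvCapA
  String.ofList (paths.foldl (fun acc path => acc ++ path.toList) [])  -- name_root_name = name_root_name + path

-- ===== PORT B =====
-- s[0].upper() + s[1:]; `none` branch unreachable under Pre_ (Python raises IndexError there)
def pvCapB (s : String) : String :=
  String.ofList ((match PySem.Str.pyGet? s 0 with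
                  | some c => PySem.Chars.upper [c]
                  | none => []) ++ PySem.Chars.slice s.toList (some 1) none)

def name_root_node_alt (endpoint : List (String × String)) : String :=
  let segs := PySem.List.slice ((PySem.Str.split? ((endpoint.lookup "path").getD "") "/").getD []) (some 1) none
  let parts := segs.foldl (fun parts s =>
      match PySem.Str.pyGet? s 0 with   -- s[0] (IndexError on "" is outside Pre_)
      | none => parts
      | some c => if c == '{' then parts
                  else parts ++ [if parts.isEmpty then s else pvCapB s]) []
  PySem.Str.join "" parts

-- ===== PRECONDITION & SPEC =====
-- Pre_ excludes the inputs where the Python raises — a missing 'path' key (KeyError) and an empty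
-- segment after the first '/' (IndexError from path[0] in both A's helper and B) — and, beyond that,
-- paths whose segment before the first '/' itself starts with '{' and also occurs among the later
-- segments: there A's remove-by-value deletes the leading segment instead of the later path variable
-- and 'del paths[0]' then drops an arbitrary segment, an accidental corner on malformed paths (real
-- paths begin with '/'), so neither value is specified.
def Pre_name_root_node (endpoint : List (String × String)) : Prop :=
  let segs := PySem.Chars.splitOn ((endpoint.lookup "path").getD "").toList "/".toList
  (endpoint.lookup "path").isSome = true ∧
  (∀ s ∈ segs.tail, s ≠ []) ∧
  ¬ ((segs.headD []).head? = some '{' ∧ segs.headD [] ∈ segs.tail)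
instance (endpoint : List (String × String)) : Decidable (Pre_name_root_node endpoint) := by
  unfold Pre_name_root_node; infer_instance

def pvWitness_name_root_node : (List (String × String)) := [("path", "/store/{storeId}/pets")]

def Spec_name_root_node (endpoint : List (String × String)) (out : String) : Prop :=
  out = name_root_node_alt endpoint
instance (endpoint : List (String × String)) (out : String) : Decidable (Spec_name_root_node endpoint out) := by
  unfold Spec_name_root_node; infer_instance

-- ===== CLAIM (what is proved, stated in full; the proofs are below) =====
def Claim_equal_name_root_node : Prop := ∀ (endpoint : List (String × String)), Dom_name_root_node endpoint → Pre_name_root_node endpoint → Spec_name_root_node endpoint (name_root_node endpoint)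

-- ===== LEMMAS AND PROOFS =====

-- abbreviation used only by the proofs: "segment starts with '{'"
def pvBr (s : String) : Bool := PySem.Str.pyGet? s 0 == some '{'

-- B's loop body once the segment is known nonempty
def pvStepBr (parts : List String) (s : String) : List String :=
  if pvBr s then parts else parts ++ [if parts.isEmpty then s else pvCapB s]

-- nonempty strings have a first character
theorem pvGetSome (s : String) (hs : s ≠ "") : ∃ c, PySem.Str.pyGet? s 0 = some c := by
  have hl : s.toList ≠ [] := fun h => hs (by
    have := congrArg String.ofList h
    simpa using this)
  cases hcs : s.toList with
  | nil => exact absurd hcs hl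
  | cons c cs =>
    exact ⟨c, by simp [PySem.Str.pyGet?_eq, hcs, PySem.List.pyGet?, PySem.List.pyIdx?]⟩

-- A's remove-step is List.erase (remove? of an absent value falls back to the unchanged list)
theorem pvRemoveStep (ps : List String) (v : String) :
    (PySem.List.remove? ps v).getD ps = ps.erase v := by
  by_cases h : v ∈ ps
  · rw [PySem.List.remove?_eq_some_erase ps v h]; rfl
  · rw [(PySem.List.remove?_eq_none_iff ps v).mpr h, List.erase_of_not_mem h]; rfl

theorem pvRmFoldErase (vs : List String) (ps : List String) :
    vs.foldl (fun ps v => (PySem.List.remove? ps v).getD ps) ps = vs.foldl List.erase ps := by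
  simp only [pvRemoveStep]

-- erasing values all different from the head passes over the head
theorem pvEraseSkipHead (vs : List String) (x : String) (l : List String)
    (h : ∀ v ∈ vs, v ≠ x) :
    vs.foldl List.erase (x :: l) = x :: vs.foldl List.erase l := by
  induction vs generalizing l with
  | nil => rfl
  | cons v vs ih =>
    simp only [List.foldl_cons]
    rw [List.erase_cons_tail (by simp [Ne.symm (h v (by simp))]),
        ih _ (fun w hw => h w (by simp [hw]))]

-- erasing, in order, the brace segments of t from t leaves exactly the non-brace segments
theorem pvEraseFilter (t : List String) :
    (t.filter pvBr).foldl List.erase t = t.filter (fun s => !pvBr s) := by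
  induction t with
  | nil => rfl
  | cons x rest ih =>
    by_cases hx : pvBr x = true
    · simp only [List.filter_cons, hx]
      simpa [hx, List.erase_cons_head] using ih
    · have hx' : pvBr x = false := by simpa using hx
      have hvx : ∀ v ∈ rest.filter pvBr, v ≠ x := by
        intro v hv hvx
        have := List.of_mem_filter hv
        rw [hvx] at this
        simp [hx'] at this
      simp only [List.filter_cons, hx']
      simp only [Bool.false_eq_true, if_false, Bool.not_false, if_true]
      rw [pvEraseSkipHead _ x rest hvx]
      exact congrArg (List.cons x) ih

-- the two capitalizers agree
theorem pvCap_eq (s : String) : pvCapA s = pvCapB s := by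
  unfold pvCapA pvCapB
  congr 2
  rw [PySem.Chars.slice_eq_listSlice, PySem.Chars.slice_eq_listSlice]
  rw [PySem.List.slice_toNat _ (by omega) (by simp [PySem.Str.len_eq]),
      PySem.List.slice_from _ (by omega)]
  simp [PySem.Str.len_eq]

-- on nonempty segments B's loop body is pvStepBr
theorem pvStep_eq (parts : List String) (s : String) (hs : s ≠ "") :
    (match PySem.Str.pyGet? s 0 with
     | none => parts
     | some c => if c == '{' then parts
                 else parts ++ [if parts.isEmpty then s else pvCapB s])
    = pvStepBr parts s := by
  obtain ⟨c, hc⟩ := pvGetSome s hs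
  have hb : pvBr s = (c == '{') := by unfold pvBr; rw [hc]; simp
  rw [hc]
  unfold pvStepBr
  rw [hb]

-- B's accumulating loop, once the accumulator is nonempty
theorem pvBfoldNe (t : List String) (a₀ : String) (acc : List String) :
    t.foldl pvStepBr (a₀ :: acc)
    = (a₀ :: acc) ++ (t.filter (fun s => !pvBr s)).map pvCapB := by
  induction t generalizing acc with
  | nil => simp
  | cons s rest ih =>
    by_cases hbr : pvBr s = true
    · simp only [List.foldl_cons, pvStepBr, hbr, if_true, List.filter_cons, Bool.not_true,
        Bool.false_eq_true, if_false]
      exact ih acc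
    · have hbr' : pvBr s = false := by simpa using hbr
      simp only [List.foldl_cons, pvStepBr, hbr', Bool.false_eq_true, if_false,
        List.isEmpty_cons, List.filter_cons, Bool.not_false, if_true]
      refine (ih (acc ++ [pvCapB s])).trans ?_
      simp

-- B's loop from the empty accumulator: first kept segment unchanged, the rest capitalized
theorem pvBfold (t : List String) :
    t.foldl pvStepBr []
    = (match t.filter (fun s => !pvBr s) with
       | [] => []
       | f :: rest => f :: rest.map pvCapB) := by
  induction t with
  | nil => rfl
  | cons s rest ih =>
    by_cases hbr : pvBr s = true
    · simp only [List.foldl_cons, pvStepBr, hbr, if_true, List.filter_cons, Bool.not_true,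
        Bool.false_eq_true, if_false]
      exact ih
    · have hbr' : pvBr s = false := by simpa using hbr
      simp only [List.foldl_cons, pvStepBr, hbr', Bool.false_eq_true, if_false,
        List.isEmpty_nil, if_true, List.nil_append, List.filter_cons, Bool.not_false]
      rw [pvBfoldNe rest s []]
      simp

-- joining with the empty separator is concatenation
theorem pvJoinNil (xss : List (List Char)) : PySem.Chars.join [] xss = xss.flatten := by
  induction xss with
  | nil => simp [PySem.Chars.join_nil]
  | cons p rest ih =>
    cases rest with
    | nil => simp [PySem.Chars.join_singleton]
    | cons q rest' => rw [PySem.Chars.join_cons_cons]; simp_all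

-- A's params list is the brace-filter of the tail of the split
theorem pvParamsEq (endpoint : List (String × String)) (h : String) (t : List String)
    (hp : (PySem.Str.split? ((endpoint.lookup "path").getD "") "/").getD [] = h :: t) :
    pvPathVariables endpoint = t.filter pvBr := by
  simp only [pvPathVariables]
  rw [hp]
  rw [PySem.List.slice_toNat _ (by omega) (by positivity)]
  have h1 : (((h :: t).length : Int)).toNat - (1 : Int).toNat = t.length := by simp
  rw [h1]
  simp only [Int.toNat_one, List.drop_one, List.tail_cons, List.take_length]
  have h2 := PySem.List.foldl_append_if (fun path => PySem.Str.pyGet? path 0 == some '{') id t []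
  simp only [id_eq, List.map_id, List.nil_append] at h2
  rw [h2]
  rfl

-- pvBr read on the character list
theorem pvBrChars (s : String) : pvBr s = (s.toList.head? == some '{') := by
  cases hcs : s.toList with
  | nil =>
    have hs : s = "" := by rw [← String.ofList_toList (s := s), hcs]
    rw [hs]
    decide
  | cons c cs =>
    have h0 : PySem.Str.pyGet? s 0 = some c := by
      simp [PySem.Str.pyGet?_eq, hcs, PySem.List.pyGet?, PySem.List.pyIdx?]
    unfold pvBr
    rw [h0]
    rfl

-- the character-level split Pre_ inspects, read off from A's split
theorem pvSegsEq (p : String) (h : String) (t : List String)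
    (hp : (PySem.Str.split? p "/").getD [] = h :: t) :
    PySem.Chars.splitOn p.toList ['/'] = h.toList :: t.map String.toList := by
  have hb := PySem.Str.split?_map p "/"
  have hsep : ("/" : String).toList = ['/'] := by decide
  rw [hsep] at hb
  have hsplit : PySem.Chars.split? p.toList ['/'] = some (PySem.Chars.splitOn p.toList ['/']) := by
    simp [PySem.Chars.split?]
  cases hq : PySem.Str.split? p "/" with
  | none =>
    rw [hq, hsplit] at hb
    simp at hb
  | some xs =>
    rw [hq] at hp
    simp only [Option.getD_some] at hp
    subst hp
    rw [hq, hsplit] at hb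
    simp only [Option.map_some, Option.some.injEq] at hb
    exact hb.symm

-- what Pre_ gives about the split A computes: nonempty tail segments, and no removal value equal to the head
theorem pvPreElim (endpoint : List (String × String)) (h : String) (t : List String)
    (hp : (PySem.Str.split? ((endpoint.lookup "path").getD "") "/").getD [] = h :: t)
    (hpre : Pre_name_root_node endpoint) :
    (∀ s ∈ t, s ≠ "") ∧ (∀ v ∈ t.filter pvBr, v ≠ h) := by
  obtain ⟨-, hne, hno⟩ := hpre
  rw [show ("/" : String).toList = ['/'] from by decide, pvSegsEq _ h t hp] at hne hno
  simp only [List.tail_cons] at hne hno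
  constructor
  · intro s hs hse
    exact hne s.toList (List.mem_map_of_mem hs) (by rw [hse]; decide)
  · intro v hv hvh
    have hbrv : pvBr v = true := List.of_mem_filter hv
    have hmem : v ∈ t := List.mem_of_mem_filter hv
    subst hvh
    refine hno ⟨?_, ?_⟩
    · simp only [List.headD_cons]
      have := pvBrChars v
      rw [hbrv] at this
      exact (beq_iff_eq.mp this.symm)
    · simpa only [List.headD_cons] using List.mem_map_of_mem hmem

theorem pvMain (endpoint : List (String × String))
    (hpre : Pre_name_root_node endpoint) :
    name_root_node endpoint = name_root_node_alt endpoint := by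
  cases hp : (PySem.Str.split? ((endpoint.lookup "path").getD "") "/").getD [] with
  | nil =>
    simp only [name_root_node, name_root_node_alt, pvPathVariables]
    rw [hp]
    simp [PySem.List.slice, PySem.Str.join]
  | cons h t =>
    obtain ⟨hne, hno⟩ := pvPreElim endpoint h t hp hpre
    simp only [name_root_node, name_root_node_alt]
    rw [hp, pvParamsEq endpoint h t hp, pvRmFoldErase]
    have herase : (t.filter pvBr).foldl List.erase (h :: t) = h :: t.filter (fun s => !pvBr s) := by
      rw [pvEraseSkipHead _ h t hno, pvEraseFilter]
    rw [herase]
    rw [PySem.List.slice_from _ (by omega)]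
    simp only [List.drop_one, List.tail_cons, Int.toNat_one]
    rw [PySem.List.foldl_congr_mem t _ pvStepBr []
      (fun acc s hs => pvStep_eq acc s (hne s hs))]
    rw [pvBfold t]
    cases hf : t.filter (fun s => !pvBr s) with
    | nil =>
      simp [PySem.Str.join]
    | cons f rest =>
      rw [PySem.List.foldl_append_eq_flatMap String.toList (f :: rest.map pvCapA) []]
      have hjoin : PySem.Str.join "" (f :: rest.map pvCapB)
          = String.ofList ((f :: rest.map pvCapB).map String.toList).flatten := by
        have h1 : (PySem.Str.join "" (f :: rest.map pvCapB)).toList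
            = ((f :: rest.map pvCapB).map String.toList).flatten := by
          rw [PySem.Str.toList_join]
          simpa using pvJoinNil ((f :: rest.map pvCapB).map String.toList)
        rw [← h1, String.ofList_toList]
      rw [hjoin]
      congr 1
      simp [List.flatMap_def, Function.comp_def, pvCap_eq]

-- ===== VERDICT (by name: the statement is the Claim_ definition above) =====
theorem name_root_node_spec : Claim_equal_name_root_node := by
  intro endpoint _ hpre
  exact pvMain endpoint hpre
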